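-- pv_equiv track=rewrite | github.com/GreyGao/algorithm-practice-ts | grokking_algorithms_py/03_recursion/04_findMaxBox.py | findMaxBox
-- ===== SOURCE A (Python) =====
-- def findMaxBox(width, height):
--   long = max(width, height)
--   short = min(width, height)
--   if long == 2 * short:
--     return short
--   else:
--     remainder = long % short
--     return findMaxBox(short, remainder)
-- ===== SOURCE B (Python) =====
-- def findMaxBox(width, height):
--     # Walk the Euclidean remainder chain on the pair sorted ONCE up front: on the
--     # positive domain each step (a, b) -> (b, a % b) keeps the pair sorted, so the
--     # per-call max/min of the recursive version disappear; answer = the divisor at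
--     # the step whose dividend is exactly twice it (the `%` raises where A's does).
--     a, b = max(width, height), min(width, height)
--     while a != 2 * b:
--         a, b = b, a % b
--     return b
-- ===== Notes on version B (the rewrite author's own statement) =====
-- stated objective: alternative
-- what changed: Replaces A's recursion, which re-derives max/min on every call, by a single up-front sort followed by a plain Euclidean-chain loop over (a, b) -> (b, a % b): the step preserves the ordering on the positive domain, so the per-call max/min and the call stack both disappear while the 2*short base case and the raising behaviour are kept.
import Mathlib
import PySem

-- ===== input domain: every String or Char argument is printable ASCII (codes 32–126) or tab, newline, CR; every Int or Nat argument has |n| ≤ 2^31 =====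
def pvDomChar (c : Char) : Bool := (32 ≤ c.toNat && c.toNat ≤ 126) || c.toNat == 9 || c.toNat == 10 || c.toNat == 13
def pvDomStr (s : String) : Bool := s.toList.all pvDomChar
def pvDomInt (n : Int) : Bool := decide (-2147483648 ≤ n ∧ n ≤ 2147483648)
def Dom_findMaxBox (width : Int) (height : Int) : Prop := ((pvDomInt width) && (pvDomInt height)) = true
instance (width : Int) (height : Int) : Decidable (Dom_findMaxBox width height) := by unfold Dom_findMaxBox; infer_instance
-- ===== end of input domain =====

-- B sorts the pair once and runs the Euclidean chain as a plain loop (the step keeps the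
-- pair sorted on the positive domain), instead of A's recursion re-deriving max/min each call.

-- ===== PORT A =====
-- Literal port of A's recursion.  The recursion is not structurally decreasing on Int
-- (on negative inputs the Python recurses until RecursionError), so it is driven by a
-- fuel counter; on Pre_ the short side strictly decreases each step, so the fuel
-- (min w h).toNat + 1 is never exhausted there and the fuel-0 branch is unreachable.
def findMaxBoxGo : Nat → Int → Int → Int
  | 0, _, height => height
  | fuel + 1, width, height =>
    let long : Int := max width height
    let short : Int := min width height
    if long = 2 * short then short
    else
      let remainder : Int := PySem.Int.mod long short
      findMaxBoxGo fuel short remainder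

def findMaxBox (width : Int) (height : Int) : Int :=
  findMaxBoxGo ((min width height).toNat + 1) width height

-- ===== PORT B =====
-- Termination measure for Source B's loop: one Python-mod step shrinks |divisor|.
lemma pymod_natAbs_lt (a b : Int) (hb : b ≠ 0) :
    (PySem.Int.mod a b).natAbs < b.natAbs := by
  rcases lt_or_gt_of_ne hb with h | h
  · have := PySem.Int.mod_neg_bounds (a := a) h
    omega
  · have h1 := PySem.Int.mod_nonneg (a := a) h
    have h2 := PySem.Int.mod_lt (a := a) h
    omega

-- Port of Source B's loop `while a != 2 * b: a, b = b, a % b; return b`, entered on the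
-- once-sorted pair.  Python raises ZeroDivisionError when the loop reaches b = 0 with
-- a ≠ 0; the `b = 0` branch only makes the Lean recursion total (it is never compared,
-- since the Python returns no value there).
def findMaxBoxChain (a : Int) (b : Int) : Int :=
  if a = 2 * b then b
  else if b = 0 then 0
  else findMaxBoxChain b (PySem.Int.mod a b)
termination_by b.natAbs
decreasing_by exact pymod_natAbs_lt a b (by assumption)

def findMaxBox_alt (width : Int) (height : Int) : Int :=
  findMaxBoxChain (max width height) (min width height)

-- ===== PRECONDITION & SPEC =====
-- lastQuot a b: the last partial quotient of the continued fraction of a/b (the final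
-- quotient of the Euclidean quotient chain of (a, b)) for b > 0, and 0 otherwise — a
-- standard number-theoretic quantity, not a run of either port.  The fuel b.toNat makes
-- the recursion structural; it is exact, since the chain's divisor strictly decreases.
def lastQuotAux : Nat → Int → Int → Int
  | 0, _, _ => 0
  | n + 1, a, b =>
    if b ≤ 0 then 0
    else if a % b = 0 then a / b else lastQuotAux n b (a % b)

def lastQuot (a : Int) (b : Int) : Int := lastQuotAux b.toNat a b

-- A returns exactly on (0,0) and on positive pairs whose continued fraction of
-- max/min has last partial quotient 2 (only then does `long == 2*short` ever fire);
-- everywhere else A raises (ZeroDivisionError when a modulo divisor hits 0,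
-- RecursionError on pairs with a negative side).
def Pre_findMaxBox (width : Int) (height : Int) : Prop :=
  (width = 0 ∧ height = 0) ∨
    (0 < width ∧ 0 < height ∧ lastQuot (max width height) (min width height) = 2)

instance (width : Int) (height : Int) : Decidable (Pre_findMaxBox width height) := by
  unfold Pre_findMaxBox; infer_instance

def pvWitness_findMaxBox : Int × Int := (4, 6)

def Spec_findMaxBox (width : Int) (height : Int) (out : Int) : Prop := out = findMaxBox_alt width height
instance (width : Int) (height : Int) (out : Int) : Decidable (Spec_findMaxBox width height out) := by unfold Spec_findMaxBox; infer_instance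

-- ===== CLAIM (what is proved, stated in full; the proofs are below) =====
def Claim_equal_findMaxBox : Prop := ∀ (width : Int) (height : Int), Dom_findMaxBox width height → Pre_findMaxBox width height → Spec_findMaxBox width height (findMaxBox width height)

-- ===== LEMMAS AND PROOFS =====

-- lastQuotAux is independent of the fuel once the fuel covers the divisor.
lemma lastQuotAux_stable : ∀ (n m : Nat) (a b : Int), 0 < b → b.toNat ≤ n → b.toNat ≤ m →
    lastQuotAux n a b = lastQuotAux m a b := by
  intro n
  induction n with
  | zero => intro m a b hb hn _; omega
  | succ n ih =>
    intro m a b hb hn hm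
    obtain ⟨m', rfl⟩ : ∃ m', m = m' + 1 := ⟨m - 1, by omega⟩
    simp only [lastQuotAux, if_neg (by omega : ¬ b ≤ 0)]
    by_cases h0 : a % b = 0
    · simp [h0]
    · rw [if_neg h0, if_neg h0]
      have hr0 : 0 ≤ a % b := Int.emod_nonneg a (by omega)
      have hrb : a % b < b := Int.emod_lt_of_pos a hb
      exact ih m' b (a % b) (by omega) (by omega) (by omega)

-- One Euclidean step of the chain: if the last quotient is 2 but long ≠ 2*short, the
-- remainder is nonzero and the shifted pair still has last quotient 2.
lemma lastQuot_step (a b : Int) (hb : 0 < b) (hq : lastQuot a b = 2) (hne : a ≠ 2 * b) :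
    a % b ≠ 0 ∧ lastQuot b (a % b) = 2 := by
  obtain ⟨k, hk⟩ : ∃ k, b.toNat = k + 1 := ⟨b.toNat - 1, by omega⟩
  rw [lastQuot, hk] at hq
  simp only [lastQuotAux, if_neg (by omega : ¬ b ≤ 0)] at hq
  by_cases h0 : a % b = 0
  · rw [if_pos h0] at hq
    have hdvd : b ∣ a := Int.dvd_of_emod_eq_zero h0
    have : a = 2 * b := by
      have := Int.ediv_mul_cancel hdvd
      rw [hq] at this; omega
    exact absurd this hne
  · rw [if_neg h0] at hq
    have hr0 : 0 ≤ a % b := Int.emod_nonneg a (by omega)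
    have hrb : a % b < b := Int.emod_lt_of_pos a hb
    refine ⟨h0, ?_⟩
    rw [lastQuot]
    rw [lastQuotAux_stable ((a % b).toNat) k b (a % b) (by omega) (by omega) (by omega)]
    exact hq

-- One-step unfolding equation for A's fueled recursion.
lemma findMaxBoxGo_succ (fuel : Nat) (w h : Int) :
    findMaxBoxGo (fuel + 1) w h =
      if max w h = 2 * min w h then min w h
      else findMaxBoxGo fuel (min w h) (PySem.Int.mod (max w h) (min w h)) := rfl

-- Core equivalence: on a positive pair, A's recursion with sufficient fuel equals B's
-- chain loop entered on the sorted pair.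
lemma go_eq_chain : ∀ (n : Nat) (w h : Int), 0 < w → 0 < h →
    (min w h).toNat ≤ n + 1 →
    lastQuot (max w h) (min w h) = 2 →
    findMaxBoxGo (n + 1) w h = findMaxBoxChain (max w h) (min w h) := by
  intro n
  induction n with
  | zero =>
    intro w h hw hh hn hq
    have hb : 0 < min w h := by omega
    have hb1 : min w h = 1 := by omega
    rw [findMaxBoxGo_succ, findMaxBoxChain]
    by_cases hbase : max w h = 2 * min w h
    · rw [if_pos hbase, if_pos hbase]
    · exfalso
      have := lastQuot_step (max w h) (min w h) hb hq hbase
      rw [hb1] at this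
      simp at this
  | succ n ih =>
    intro w h hw hh hn hq
    have hb : 0 < min w h := by omega
    have hmod : PySem.Int.mod (max w h) (min w h) = (max w h) % (min w h) :=
      PySem.Int.mod_eq_emod_of_pos hb
    rw [findMaxBoxGo_succ, findMaxBoxChain]
    by_cases hbase : max w h = 2 * min w h
    · rw [if_pos hbase, if_pos hbase]
    · rw [if_neg hbase, if_neg hbase, if_neg (by omega : ¬ min w h = 0)]
      obtain ⟨hr0, hq'⟩ := lastQuot_step (max w h) (min w h) hb hq hbase
      have hrpos : 0 < (max w h) % (min w h) := by
        have := Int.emod_nonneg (max w h) (by omega : min w h ≠ 0); omega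
      have hrlt : (max w h) % (min w h) < min w h := Int.emod_lt_of_pos _ hb
      have hmaxbr : max (min w h) ((max w h) % (min w h)) = min w h := max_eq_left (by omega)
      have hminbr : min (min w h) ((max w h) % (min w h)) = (max w h) % (min w h) :=
        min_eq_right (by omega)
      have hrec := ih (min w h) ((max w h) % (min w h)) hb hrpos
        (by omega) (by rw [hmaxbr, hminbr]; exact hq')
      rw [hmaxbr, hminbr] at hrec
      rw [hmod, hrec]

-- ===== VERDICT (by name: the statement is the Claim_ definition above) =====
theorem findMaxBox_spec : Claim_equal_findMaxBox := by
  intro w h _ hpre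
  unfold Spec_findMaxBox
  rcases hpre with ⟨rfl, rfl⟩ | ⟨hw, hh, hq⟩
  · show findMaxBoxGo 1 0 0 = findMaxBox_alt 0 0
    rw [findMaxBox_alt, findMaxBoxChain]
    rfl
  · unfold findMaxBox findMaxBox_alt
    exact go_eq_chain ((min w h).toNat) w h hw hh (by omega) hq
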